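-- pv_equiv track=rewrite | github.com/luke-wagner/EndgameExpert | python/flip_fen_sides.py | get_flipped_fen
-- ===== SOURCE A (Python) =====
-- def get_flipped_fen(fen):
--     stack = []
--
--     rows = fen.split('/')
--     for row in rows:
--         reversed_row = row[::-1] # Reverse string
--         stack.append(reversed_row)
--
--     final_fen = ""
--     stack_len = len(stack)
--     for i in range(stack_len):
--         row = stack.pop()
--         final_fen += row
--         if i < stack_len - 1:
--             final_fen += '/'
--
--     return final_fen
-- ===== SOURCE B (Python) =====
-- def get_flipped_fen(fen):
--     # Reversing each '/'-separated row and then emitting the rows in reverse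
--     # order is exactly a reversal of the whole string.
--     return fen[::-1]
-- ===== Notes on version B (the rewrite author's own statement) =====
-- stated objective: simpler
-- what changed: Replaces the split-on-'/', per-row reversal and pop-in-reverse-order reassembly with a single whole-string reversal fen[::-1], which is provably the same value.
import Mathlib
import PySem

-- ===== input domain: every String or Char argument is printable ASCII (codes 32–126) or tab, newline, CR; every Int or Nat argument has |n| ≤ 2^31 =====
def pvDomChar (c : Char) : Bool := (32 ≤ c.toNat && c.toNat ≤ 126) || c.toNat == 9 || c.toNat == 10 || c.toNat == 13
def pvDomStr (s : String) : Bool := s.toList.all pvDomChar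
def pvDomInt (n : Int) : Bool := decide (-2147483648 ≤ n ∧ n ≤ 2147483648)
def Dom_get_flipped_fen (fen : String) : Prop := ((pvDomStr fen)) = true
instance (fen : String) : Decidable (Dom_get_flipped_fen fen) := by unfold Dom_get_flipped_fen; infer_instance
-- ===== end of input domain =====

-- B replaces A's split/reverse-each-row/pop-in-reverse-order pipeline by a single
-- whole-string reversal fen[::-1]; proved equal for every input.

-- ===== PORT A =====
-- Ported on the code-point list (PySem.Chars/PySem.List are the exact List Char forms).
def get_flipped_fen (fen : String) : String :=
  -- rows = fen.split('/')
  let rows := PySem.Chars.splitOn fen.toList "/".toList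
  -- for row in rows: stack.append(row[::-1])   (row[::-1] never raises; getD only makes the slice total)
  let stack := rows.foldl
    (fun st row => st ++ [(PySem.List.slice? row none none (-1)).getD []]) []
  let stack_len : Int := stack.length
  -- for i in range(stack_len): row = stack.pop(); final_fen += row; if i < stack_len - 1: final_fen += '/'
  let st :=
    (PySem.List.pyRange 0 stack_len 1).foldl
      (fun (s : List (List Char) × List Char) i =>
        match PySem.List.pop? s.1 (-1) with
        | some (row, rest) => (rest, s.2 ++ row ++ (if i < stack_len - 1 then ['/'] else []))
        | none => s)  -- unreachable: the stack holds exactly stack_len rows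
      (stack, [])
  String.ofList st.2

-- ===== PORT B =====
def get_flipped_fen_alt (fen : String) : String :=
  -- return fen[::-1]   (getD only makes the slice total; step -1 never yields none)
  String.ofList ((PySem.List.slice? fen.toList none none (-1)).getD [])

-- ===== PRECONDITION & SPEC =====
def Spec_get_flipped_fen (fen : String) (out : String) : Prop := out = get_flipped_fen_alt fen
instance (fen : String) (out : String) : Decidable (Spec_get_flipped_fen fen out) := by unfold Spec_get_flipped_fen; infer_instance

-- ===== CLAIM (what is proved, stated in full; the proofs are below) =====
def Claim_equal_get_flipped_fen : Prop := ∀ (fen : String), Dom_get_flipped_fen fen → Spec_get_flipped_fen fen (get_flipped_fen fen)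

-- ===== LEMMAS AND PROOFS =====

-- splitOn.go prepends its accumulator (reversed) to the result.
lemma go_acc (sep : List Char) (fuel : Nat) (l cur : List Char) (acc : List (List Char)) :
    PySem.Chars.splitOn.go sep fuel l cur acc
      = acc.reverse ++ PySem.Chars.splitOn.go sep fuel l cur [] := by
  induction fuel generalizing l cur acc with
  | zero => simp [PySem.Chars.splitOn.go]
  | succ fuel ih =>
    cases l with
    | nil => simp [PySem.Chars.splitOn.go]
    | cons c rest =>
      simp only [PySem.Chars.splitOn.go]
      split_ifs with h
      · rw [ih _ _ (cur.reverse :: acc), ih _ _ [cur.reverse]]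
        simp
      · exact ih _ _ _

-- splitOn.go never returns the empty list.
lemma go_ne_nil (sep : List Char) (fuel : Nat) (l cur : List Char) (acc : List (List Char)) :
    PySem.Chars.splitOn.go sep fuel l cur acc ≠ [] := by
  induction fuel generalizing l cur acc with
  | zero => simp [PySem.Chars.splitOn.go]
  | succ fuel ih =>
    cases l with
    | nil => simp [PySem.Chars.splitOn.go]
    | cons c rest =>
      simp only [PySem.Chars.splitOn.go]
      split_ifs with h
      · exact ih _ _ _
      · exact ih _ _ _

-- Joining the pieces of splitOn.go with the single-char separator restores cur.reverse ++ l.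
lemma join_go (c : Char) (fuel : Nat) (l cur : List Char) (h : l.length ≤ fuel) :
    PySem.Chars.join [c] (PySem.Chars.splitOn.go [c] fuel l cur []) = cur.reverse ++ l := by
  induction fuel generalizing l cur with
  | zero =>
    have : l = [] := List.eq_nil_of_length_eq_zero (Nat.le_zero.mp h)
    subst this
    simp [PySem.Chars.splitOn.go, PySem.Chars.join_singleton]
  | succ fuel ih =>
    cases l with
    | nil => simp [PySem.Chars.splitOn.go, PySem.Chars.join_singleton]
    | cons c' rest =>
      simp only [PySem.Chars.splitOn.go]
      split_ifs with hp
      · have hc : c = c' := by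
          simpa [List.isPrefixOf] using hp
        subst hc
        rw [go_acc]
        simp only [List.length_singleton, List.drop_succ_cons, List.drop_zero]
        obtain ⟨x, t, hxt⟩ :=
          List.exists_cons_of_ne_nil (go_ne_nil [c] fuel rest [] [])
        rw [hxt]
        simp only [List.reverse_cons, List.reverse_nil, List.nil_append, List.cons_append,
          List.nil_append, PySem.Chars.join_cons_cons]
        have := ih rest [] (by simpa using Nat.le_of_succ_le_succ h)
        rw [hxt] at this
        simp only [List.reverse_nil, List.nil_append] at this
        rw [this]
        simp [List.isPrefixOf] at hp
        simp
      · rw [ih rest (c' :: cur) (by simpa using Nat.le_of_succ_le_succ h)]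
        simp
-- Corollary: joining fen.split('/') with '/' gives back fen.
lemma join_splitOn (c : Char) (s : List Char) :
    PySem.Chars.join [c] (PySem.Chars.splitOn s [c]) = s := by
  have := join_go c (s.length + 1) s [] (Nat.le_succ _)
  simpa [PySem.Chars.splitOn] using this

-- join sep (xs ++ [y]) appends for nonempty xs.
lemma join_snoc (sep y : List Char) (xs : List (List Char)) (h : xs ≠ []) :
    PySem.Chars.join sep (xs ++ [y]) = PySem.Chars.join sep xs ++ sep ++ y := by
  induction xs with
  | nil => exact absurd rfl h
  | cons x t ih =>
    cases t with
    | nil => simp [PySem.Chars.join_cons_cons, PySem.Chars.join_singleton]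
    | cons b t2 =>
      have : (b :: t2) ++ [y] = b :: (t2 ++ [y]) := rfl
      rw [List.cons_append, this, PySem.Chars.join_cons_cons, ← this,
        ih (by simp), PySem.Chars.join_cons_cons]
      simp

-- Reversing rows and their order turns join into the reversed join.
lemma join_reverse (c : Char) (rows : List (List Char)) :
    PySem.Chars.join [c] ((rows.map List.reverse).reverse)
      = (PySem.Chars.join [c] rows).reverse := by
  induction rows with
  | nil => simp [PySem.Chars.join_nil]
  | cons a t ih =>
    cases t with
    | nil => simp [PySem.Chars.join_singleton]
    | cons b t2 =>
      rw [PySem.Chars.join_cons_cons]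
      simp only [List.map_cons, List.reverse_cons]
      rw [join_snoc _ _ _ (by simp)]
      rw [show ((List.map List.reverse t2).reverse ++ [b.reverse])
            = ((b :: t2).map List.reverse).reverse by simp]
      rw [ih]
      simp

-- The pop loop over range(k, n) with stack u.reverse produces acc ++ join '/' u.
lemma loop_eq (c : Char) (n : Int) (u : List (List Char)) (k : Nat) (acc : List Char)
    (h : (k : Int) + u.length = n) :
    ((PySem.List.pyRange (k : Int) n 1).foldl
      (fun (s : List (List Char) × List Char) i =>
        match PySem.List.pop? s.1 (-1) with
        | some (row, rest) => (rest, s.2 ++ row ++ (if i < n - 1 then [c] else []))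
        | none => s)
      (u.reverse, acc)).2 = acc ++ PySem.Chars.join [c] u := by
  induction u generalizing k acc with
  | nil =>
    rw [PySem.List.pyRange_one_eq_nil (by simpa using h.ge)]
    simp [PySem.Chars.join_nil]
  | cons x v ih =>
    have hk : (k : Int) < n := by simp at h; omega
    rw [PySem.List.pyRange_one_cons hk]
    simp only [List.foldl_cons, List.reverse_cons, PySem.List.pop?_last]
    cases v with
    | nil =>
      have hn : n = (k : Int) + 1 := by simpa using h.symm
      rw [if_neg (by omega)]
      rw [PySem.List.pyRange_one_eq_nil (le_of_eq (by omega))]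
      simp [PySem.Chars.join_singleton]
    | cons y t =>
      rw [if_pos (by simp only [List.length_cons] at h ⊢; push_cast at h ⊢; omega)]
      have := ih (k := k + 1) (acc := acc ++ x ++ [c]) (by simp only [List.length_cons] at h ⊢; push_cast at h ⊢; omega)
      push_cast at this
      rw [this, PySem.Chars.join_cons_cons]
      simp

-- ===== VERDICT (by name: the statement is the Claim_ definition above) =====
theorem get_flipped_fen_spec : Claim_equal_get_flipped_fen := by
  intro fen _
  unfold Spec_get_flipped_fen get_flipped_fen get_flipped_fen_alt
  simp only [PySem.List.slice?_none_none_neg_one, Option.getD_some,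
    PySem.List.foldl_append_singleton_eq_map, List.nil_append]
  set rows := PySem.Chars.splitOn fen.toList "/".toList with hrows
  have hloop := loop_eq '/' ((rows.map List.reverse).length : Int)
      ((rows.map List.reverse).reverse) 0 [] (by push_cast; simp)
  rw [List.reverse_reverse] at hloop
  push_cast at hloop
  rw [hloop, join_reverse]
  have : "/".toList = ['/'] := rfl
  rw [hrows, this, join_splitOn]
  simp
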